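-- pv_equiv track=rewrite | github.com/sieukim/algorithm-programmers | level3/ex08.py | solution
-- ===== SOURCE A (Python) =====
-- def solution(A, B):
--     # B팀의 승점
--     answer = 0
--
--     # 오름차순 정렬
--     A.sort()
--     B.sort()
--
--     for score_a in A:
--         for score_b in B:
--             if score_a < score_b:
--                 answer += 1
--                 B.remove(score_b)
--                 break
--
--     return answer
-- ===== SOURCE B (Python) =====
-- def solution(A, B):
--     # Two-pointer greedy over sorted copies: O(n log n) instead of A's O(n^2).
--     # (A mutates its arguments in place; this equivalence is about the return value only.)
--     As = sorted(A)
--     Bs = sorted(B)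
--     wins = 0
--     j = 0
--     for a in As:
--         while j < len(Bs) and Bs[j] <= a:
--             j += 1
--         if j < len(Bs):
--             wins += 1
--             j += 1
--     return wins
-- ===== Notes on version B (the rewrite author's own statement) =====
-- stated objective: faster
-- what changed: Replaces the per-element rescan-and-remove over the mutated B (quadratic) by a single two-pointer sweep over sorted copies of A and B; also stops mutating the arguments.
import Mathlib
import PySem

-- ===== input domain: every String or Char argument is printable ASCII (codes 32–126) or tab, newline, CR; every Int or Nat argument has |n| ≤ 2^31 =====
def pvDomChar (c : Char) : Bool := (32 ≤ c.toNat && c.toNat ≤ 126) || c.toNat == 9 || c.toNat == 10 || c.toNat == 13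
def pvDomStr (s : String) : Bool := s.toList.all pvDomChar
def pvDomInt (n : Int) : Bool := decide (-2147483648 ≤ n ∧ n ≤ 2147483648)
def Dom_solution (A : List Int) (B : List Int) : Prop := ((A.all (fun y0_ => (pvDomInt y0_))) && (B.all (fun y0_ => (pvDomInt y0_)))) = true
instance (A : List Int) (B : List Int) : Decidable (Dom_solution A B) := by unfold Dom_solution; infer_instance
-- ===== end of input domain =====

-- B replaces A's per-element rescan-and-remove of B (quadratic) by a two-pointer sweep
-- over sorted copies (O(n log n)); A mutates its arguments in place, the equivalence
-- proved here is about the return value only.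


-- ===== PORT A =====
-- inner 'for score_b in B: if a < b: remove it and break': returns B with the first
-- element > a removed (some), or none if no such element (exact: B.remove(v) removes the
-- first occurrence of the value v, which here is the break position itself, since an
-- earlier occurrence of the same value would also satisfy a < v and would have been hit first).
def findRemoveA (bs : List Int) (a : Int) : Option (List Int) :=
  match bs with
  | [] => none
  | b :: rest => if a < b then some rest else (findRemoveA rest a).map (b :: ·)

-- outer 'for score_a in A' with the accumulator answer
def loopA (as : List Int) (bs : List Int) : Int :=
  match as with
  | [] => 0
  | a :: rest =>
      match findRemoveA bs a with
      | none => loopA rest bs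
      | some bs' => 1 + loopA rest bs'

def solution (A : List Int) (B : List Int) : Int :=
  loopA (PySem.List.sorted A (fun x => x) false) (PySem.List.sorted B (fun x => x) false)

-- ===== PORT B =====
-- two-pointer sweep: skip bs-heads ≤ a, then match a with the next b (if any)
def twoPtr (as : List Int) (bs : List Int) : Int :=
  match as, bs with
  | [], _ => 0
  | _ :: _, [] => 0
  | a :: as', b :: bs' =>
      if b ≤ a then twoPtr (a :: as') bs'
      else 1 + twoPtr as' bs'
termination_by as.length + bs.length

def solution_alt (A : List Int) (B : List Int) : Int :=
  twoPtr (PySem.List.sorted A (fun x => x) false) (PySem.List.sorted B (fun x => x) false)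

-- ===== PRECONDITION & SPEC =====
def Spec_solution (A : List Int) (B : List Int) (out : Int) : Prop := out = solution_alt A B
instance (A : List Int) (B : List Int) (out : Int) : Decidable (Spec_solution A B out) := by unfold Spec_solution; infer_instance

-- ===== CLAIM (what is proved, stated in full; the proofs are below) =====
def Claim_equal_solution : Prop := ∀ (A : List Int) (B : List Int), Dom_solution A B → Spec_solution A B (solution A B)

-- ===== LEMMAS AND PROOFS =====

theorem loopA_nil (as : List Int) : loopA as [] = 0 := by
  induction as with
  | nil => simp [loopA]
  | cons a' as' ih' => simp [loopA, findRemoveA, ih']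

-- when every element of p is ≤ a, the inner scan just walks past p
theorem findRemoveA_append (p rest : List Int) (a : Int) (hp : ∀ x ∈ p, x ≤ a) :
    findRemoveA (p ++ rest) a = (findRemoveA rest a).map (p ++ ·) := by
  induction p with
  | nil => simp
  | cons b p ih =>
      have hb : b ≤ a := hp b (by simp)
      simp only [List.cons_append, findRemoveA, if_neg (by omega : ¬ a < b),
        ih (fun x hx => hp x (by simp [hx]))]
      cases findRemoveA rest a <;> simp

-- a prefix of already-skipped opponents (all ≤ every remaining a) never matters again
theorem loopA_skip (as : List Int) (p : List Int) (rest : List Int)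
    (hp : ∀ x ∈ p, ∀ a ∈ as, x ≤ a) :
    loopA as (p ++ rest) = loopA as rest := by
  induction as generalizing rest with
  | nil => simp [loopA]
  | cons a as ih =>
      have hpa : ∀ x ∈ p, x ≤ a := fun x hx => hp x hx a (by simp)
      have hp' : ∀ x ∈ p, ∀ a' ∈ as, x ≤ a' := fun x hx a' ha' => hp x hx a' (by simp [ha'])
      simp only [loopA, findRemoveA_append p rest a hpa]
      cases findRemoveA rest a with
      | none => simpa using ih rest hp'
      | some r => simpa using ih r hp'

theorem loopA_eq_twoPtr (as bs : List Int)
    (hA : as.Pairwise (· ≤ ·)) (hB : bs.Pairwise (· ≤ ·)) :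
    loopA as bs = twoPtr as bs := by
  induction as generalizing bs with
  | nil => cases bs <;> simp [loopA, twoPtr]
  | cons a as ihA =>
      induction bs with
      | nil => simp [loopA, findRemoveA, twoPtr, loopA_nil]
      | cons b bs ihB =>
          rcases List.pairwise_cons.mp hA with ⟨haas, hA'⟩
          rcases List.pairwise_cons.mp hB with ⟨hbbs, hB'⟩
          by_cases h : a < b
          · simp only [loopA, findRemoveA, if_pos h, twoPtr, if_neg (by omega : ¬ b ≤ a)]
            exact congrArg (1 + ·) (ihA bs hA' hB')
          · have hb : b ≤ a := by omega
            have hskip : ∀ x ∈ [b], ∀ a' ∈ a :: as, x ≤ a' := by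
              intro x hx a' ha'
              simp only [List.mem_singleton] at hx; subst hx
              rcases List.mem_cons.mp ha' with h'|h'
              · omega
              · exact le_trans hb (haas a' h')
            have := loopA_skip (a :: as) [b] bs hskip
            simp only [List.singleton_append] at this
            rw [this, twoPtr, if_pos hb]
            exact ihB hB'

-- ===== VERDICT (by name: the statement is the Claim_ definition above) =====
theorem solution_spec : Claim_equal_solution := by
  intro A B _
  unfold Spec_solution solution solution_alt
  exact loopA_eq_twoPtr _ _ (PySem.List.sorted_pairwise A (fun x => x) )
    (PySem.List.sorted_pairwise B (fun x => x))
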